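-- pv_equiv track=rewrite | github.com/OthmanGenuine/GenuineLPR | server/support_methods.py | license_formatting_ar
-- ===== SOURCE A (Python) =====
-- def license_formatting_ar(arabic_plate,names,vehicle_id):
--     arabic_translated_plate=[]
--     error="Error in detection or GCC plate"
--     arabic_num=[]
--     arabic_letter=[]
--     arabic_processed_plate=[]
--     #arabic formatting
--     if len(arabic_plate)==4:
--         arabic_num.append(arabic_plate[0])
--         arabic_letter.append(arabic_plate[1])
--         arabic_letter.append(arabic_plate[2])
--         arabic_letter.append(arabic_plate[3])
--
--     elif len(arabic_plate)==4 and vehicle_id =='motorbike':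
--         arabic_num.append(arabic_plate[0])
--         arabic_num.append(arabic_plate[1])
--         arabic_letter.append(arabic_plate[2])
--         arabic_letter.append(arabic_plate[3])
--
--     elif len(arabic_plate)==5 and vehicle_id =='motorbike':
--         arabic_num.append(arabic_plate[0])
--         arabic_num.append(arabic_plate[1])
--         arabic_num.append(arabic_plate[2])
--         arabic_letter.append(arabic_plate[3])
--         arabic_letter.append(arabic_plate[4])
--
--     elif len(arabic_plate)==5:
--         arabic_num.append(arabic_plate[0])
--         arabic_num.append(arabic_plate[1])
--         arabic_letter.append(arabic_plate[2])
--         arabic_letter.append(arabic_plate[3])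
--         arabic_letter.append(arabic_plate[4])
--
--     elif len(arabic_plate)==6:
--         arabic_num.append(arabic_plate[0])
--         arabic_num.append(arabic_plate[1])
--         arabic_num.append(arabic_plate[2])
--         arabic_letter.append(arabic_plate[3])
--         arabic_letter.append(arabic_plate[4])
--         arabic_letter.append(arabic_plate[5])
--
--     elif len(arabic_plate)==7:
--         arabic_num.append(arabic_plate[0])
--         arabic_num.append(arabic_plate[1])
--         arabic_num.append(arabic_plate[2])
--         arabic_num.append(arabic_plate[3])
--         arabic_letter.append(arabic_plate[4])
--         arabic_letter.append(arabic_plate[5])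
--         arabic_letter.append(arabic_plate[6])
--     else:
--         arabic_translated_plate.append(error)
--     if len(arabic_plate)>2:
--         for number in arabic_num:
--             arabic_processed_plate.append(number)
--         for letter in arabic_letter:
--             arabic_processed_plate.append(letter)
--
--
--     #normalization
--     # Define the English to Arabic translation dictionary
--     translation_dict = {
--         28: 'ا',
--         29: 'ب',
--         30: 'ح',
--         31: 'د',
--         32: 'ر',
--         33: 'س',
--         34: 'ص',
--         35: 'ط',
--         36: 'ع',
--         37: 'ق',
--         38: 'ك',
--         39: 'ل',
--         40: 'م',
--         41: 'ن',
--         42: 'ه',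
--         43: 'و',
--         44: 'ى',
--         45: '٠',
--         46: '١',
--         47: '٢',
--         48: '٣',
--         49: '٤',
--         50: '٥',
--         51: '٦',
--         52: '٧',
--         53: '٨',
--         54: '٩'}
--     # Translate the English string to Arabic using the translation dictionary
--     if arabic_processed_plate!= False:
--         for ch in arabic_processed_plate:
--             arabic_translated_plate.append(translation_dict[ch])
--     #returning the relevant information
--     return arabic_translated_plate
-- ===== SOURCE B (Python) =====
-- def license_formatting_ar(arabic_plate, names, vehicle_id):
--     translation_dict = {
--         28: 'ا', 29: 'ب', 30: 'ح', 31: 'د', 32: 'ر', 33: 'س', 34: 'ص',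
--         35: 'ط', 36: 'ع', 37: 'ق', 38: 'ك', 39: 'ل', 40: 'م', 41: 'ن',
--         42: 'ه', 43: 'و', 44: 'ى', 45: '٠', 46: '١', 47: '٢', 48: '٣',
--         49: '٤', 50: '٥', 51: '٦', 52: '٧', 53: '٨', 54: '٩'}
--     if len(arabic_plate) in (4, 5, 6, 7):
--         return [translation_dict[ch] for ch in arabic_plate]
--     return ["Error in detection or GCC plate"]
-- ===== Notes on version B (the rewrite author's own statement) =====
-- stated objective: simpler
-- what changed: A's num/letter split-and-reconcatenate scaffolding is a no-op (the plate is rebuilt in original order), so B just guards on len in 4..7 and translates the plate with one comprehension.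
import Mathlib
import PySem

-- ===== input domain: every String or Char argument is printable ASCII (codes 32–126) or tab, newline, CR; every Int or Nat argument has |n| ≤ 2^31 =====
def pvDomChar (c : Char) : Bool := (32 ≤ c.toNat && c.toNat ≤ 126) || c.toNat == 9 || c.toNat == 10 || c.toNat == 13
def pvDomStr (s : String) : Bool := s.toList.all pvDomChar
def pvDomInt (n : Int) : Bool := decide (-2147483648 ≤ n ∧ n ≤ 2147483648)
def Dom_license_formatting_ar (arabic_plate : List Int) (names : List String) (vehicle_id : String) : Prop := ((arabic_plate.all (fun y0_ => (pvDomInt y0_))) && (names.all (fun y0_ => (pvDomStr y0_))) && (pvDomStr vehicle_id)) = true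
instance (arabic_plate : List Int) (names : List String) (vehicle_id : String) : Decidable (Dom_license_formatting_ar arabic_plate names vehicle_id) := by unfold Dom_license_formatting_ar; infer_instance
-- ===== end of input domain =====

-- B flattens A's no-op num/letter split: guard on len 4..7 and translate the plate directly (simpler decomposition, same cost).


-- ===== PORT A =====
def trDictA : PySem.Dict Int String := PySem.Dict.ofList
  [(28, "ا"), (29, "ب"), (30, "ح"), (31, "د"), (32, "ر"), (33, "س"), (34, "ص"),
   (35, "ط"), (36, "ع"), (37, "ق"), (38, "ك"), (39, "ل"), (40, "م"), (41, "ن"),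
   (42, "ه"), (43, "و"), (44, "ى"), (45, "٠"), (46, "١"), (47, "٢"), (48, "٣"),
   (49, "٤"), (50, "٥"), (51, "٦"), (52, "٧"), (53, "٨"), (54, "٩")]

-- literal port of A; dict lookup translation_dict[ch] is exact under Pre_ (all codes present: no KeyError)
def license_formatting_ar (arabic_plate : List Int) (names : List String) (vehicle_id : String) : List String :=
  let error := "Error in detection or GCC plate"
  let g : Int → Int := fun i => (PySem.List.pyGet? arabic_plate i).getD 0
  -- the if/elif chain filling arabic_num, arabic_letter, and possibly appending error
  let st : List Int × List Int × List String :=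
    if arabic_plate.length == 4 then
      ([g 0], [g 1, g 2, g 3], [])
    else if arabic_plate.length == 4 && vehicle_id == "motorbike" then
      ([g 0, g 1], [g 2, g 3], [])
    else if arabic_plate.length == 5 && vehicle_id == "motorbike" then
      ([g 0, g 1, g 2], [g 3, g 4], [])
    else if arabic_plate.length == 5 then
      ([g 0, g 1], [g 2, g 3, g 4], [])
    else if arabic_plate.length == 6 then
      ([g 0, g 1, g 2], [g 3, g 4, g 5], [])
    else if arabic_plate.length == 7 then
      ([g 0, g 1, g 2, g 3], [g 4, g 5, g 6], [])
    else
      ([], [], [error])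
  let arabic_num := st.1
  let arabic_letter := st.2.1
  let arabic_translated_plate := st.2.2
  let arabic_processed_plate : List Int :=
    if arabic_plate.length > 2 then
      (arabic_letter.foldl (fun acc x => acc ++ [x])
        (arabic_num.foldl (fun acc x => acc ++ [x]) []))
    else []
  -- 'if arabic_processed_plate != False' is always true in Python
  arabic_processed_plate.foldl (fun acc ch => acc ++ [(trDictA.get? ch).getD ""]) arabic_translated_plate

-- ===== PORT B =====
def trDictB : PySem.Dict Int String := PySem.Dict.ofList
  [(28, "ا"), (29, "ب"), (30, "ح"), (31, "د"), (32, "ر"), (33, "س"), (34, "ص"),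
   (35, "ط"), (36, "ع"), (37, "ق"), (38, "ك"), (39, "ل"), (40, "م"), (41, "ن"),
   (42, "ه"), (43, "و"), (44, "ى"), (45, "٠"), (46, "١"), (47, "٢"), (48, "٣"),
   (49, "٤"), (50, "٥"), (51, "٦"), (52, "٧"), (53, "٨"), (54, "٩")]

def license_formatting_ar_alt (arabic_plate : List Int) (names : List String) (vehicle_id : String) : List String :=
  if arabic_plate.length == 4 || arabic_plate.length == 5 ||
     arabic_plate.length == 6 || arabic_plate.length == 7 then
    arabic_plate.map (fun ch => (trDictB.get? ch).getD "")
  else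
    ["Error in detection or GCC plate"]

-- ===== PRECONDITION & SPEC =====
-- Pre_ excludes exactly the KeyError inputs: a plate of length 4..7 containing a code outside 28..54 makes A raise.
def Pre_license_formatting_ar (arabic_plate : List Int) (names : List String) (vehicle_id : String) : Prop :=
  (4 ≤ arabic_plate.length ∧ arabic_plate.length ≤ 7) → ∀ x ∈ arabic_plate, 28 ≤ x ∧ x ≤ 54
instance (arabic_plate : List Int) (names : List String) (vehicle_id : String) : Decidable (Pre_license_formatting_ar arabic_plate names vehicle_id) := by unfold Pre_license_formatting_ar; infer_instance

def pvWitness_license_formatting_ar : List Int × List String × String := ([46, 29, 30, 31], [], "")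

def Spec_license_formatting_ar (arabic_plate : List Int) (names : List String) (vehicle_id : String) (out : List String) : Prop := out = license_formatting_ar_alt arabic_plate names vehicle_id
instance (arabic_plate : List Int) (names : List String) (vehicle_id : String) (out : List String) : Decidable (Spec_license_formatting_ar arabic_plate names vehicle_id out) := by unfold Spec_license_formatting_ar; infer_instance

-- ===== CLAIM (what is proved, stated in full; the proofs are below) =====
def Claim_equal_license_formatting_ar : Prop := ∀ (arabic_plate : List Int) (names : List String) (vehicle_id : String), Dom_license_formatting_ar arabic_plate names vehicle_id → Pre_license_formatting_ar arabic_plate names vehicle_id → Spec_license_formatting_ar arabic_plate names vehicle_id (license_formatting_ar arabic_plate names vehicle_id)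

-- ===== LEMMAS AND PROOFS =====
theorem trDict_eq : trDictA = trDictB := rfl

-- ===== VERDICT (by name: the statement is the Claim_ definition above) =====
theorem license_formatting_ar_spec : Claim_equal_license_formatting_ar := by
  intro p names vid _ _
  unfold Spec_license_formatting_ar license_formatting_ar license_formatting_ar_alt
  rw [← trDict_eq]
  match p with
  | [] => rfl
  | [a] => rfl
  | [a,b] => rfl
  | [a,b,c] => rfl
  | [a,b,c,d] => simp [PySem.List.pyGet?, PySem.List.pyIdx?]
  | [a,b,c,d,e] => by_cases h : vid == "motorbike" <;> simp [h, PySem.List.pyGet?, PySem.List.pyIdx?]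
  | [a,b,c,d,e,f] => simp [PySem.List.pyGet?, PySem.List.pyIdx?]
  | [a,b,c,d,e,f,g] => simp [PySem.List.pyGet?, PySem.List.pyIdx?]
  | a::b::c::d::e::f::g::h::t =>
    have hl : (a::b::c::d::e::f::g::h::t).length = t.length + 8 := by simp
    simp [hl]
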